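-- pv_equiv track=rewrite | github.com/dimitrisvla/Computational-Geometry | triangulation_matplot.py | check_if_y_monotone
-- ===== SOURCE A (Python) =====
-- def check_if_y_monotone(P):
--     n = len(P) # number of vertices
--
--     # Init with the 1st vertex
--     max_y = P[0][1]
--     i_max = float('-inf')  # Smaller than any other number - the pointer with max y
--     min_y = P[0][1]
--     i_min = float('inf')  # Larger than any other number - the pointer with min y
--
--     # Compute i_max and i_min locally
--     i_max = max(range(n), key=lambda i: P[i][1])
--     i_min = min(range(n), key=lambda i: P[i][1])
--
--     # Find index(or pointer) of vertex with max y and vertex with min y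
--     for index, point in enumerate(P):
--         y = point[1]
--         # Update with the max y we've found
--         if y > max_y:
--             max_y = y
--             i_max = index
--         # Update with the min y we've found
--         if y < min_y:
--             min_y = y
--             i_min = index
--
--     # Create 2 chains: left_chain and right_chain
--     left_chain = []
--     i = i_max
--     while True:
--         left_chain.append(i)
--         if i == i_min:
--             break
--         i = (i + 1) % n
--
--     right_chain = []
--     i = i_max
--     while True:
--         right_chain.append(i)
--         if i == i_min:
--             break
--         i = (i - 1 + n) % n
--
--     # Check if the left chain descends (y descending)
--     for i in range(1, len(left_chain)):
--         y_prev = P[left_chain[i - 1]][1]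
--         y_curr = P[left_chain[i]][1]
--         if y_curr > y_prev: # if y ascends at any stepp, then it's not y-monotone
--             return False
--
--     # Check if the left chain descends (y descending)
--     for i in range(1, len(right_chain)):
--         y_prev = P[right_chain[i - 1]][1]
--         y_curr = P[right_chain[i]][1]
--         if y_curr > y_prev:
--             return False
--
--     # Iff both chains are descending  <====> P is y-monotone
--     return True
-- ===== SOURCE B (Python) =====
-- def check_if_y_monotone(P):
--     # One combined scan finds the first argmax/argmin of y; then a single pass
--     # over all n cyclic edges checks each edge against the arc it lies on
--     # (descending arc iM->im forward, ascending arc im->iM forward), using a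
--     # modular-arithmetic arc test instead of building chain lists.
--     iM = im = 0
--     for i in range(1, len(P)):
--         if P[i][1] > P[iM][1]:
--             iM = i
--         if P[i][1] < P[im][1]:
--             im = i
--     n = len(P)
--     down = (im - iM) % n  # number of edges on the descending arc
--     for i in range(n):
--         d = P[(i + 1) % n][1] - P[i][1]
--         if ((i - iM) % n < down and d > 0) or ((i - iM) % n >= down and d < 0):
--             return False
--     return True
-- ===== Notes on version B (the rewrite author's own statement) =====
-- stated objective: alternative
-- what changed: A makes seven passes (max() and min() index scans, a redundant enumerate loop, two while-loops that materialise chain index lists, then two list-walking checks); B makes one combined scan for the first argmax/argmin of y and then a single pass over the n cyclic edges, classifying each edge by a modular-arithmetic arc test instead of building chains.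
import Mathlib
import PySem

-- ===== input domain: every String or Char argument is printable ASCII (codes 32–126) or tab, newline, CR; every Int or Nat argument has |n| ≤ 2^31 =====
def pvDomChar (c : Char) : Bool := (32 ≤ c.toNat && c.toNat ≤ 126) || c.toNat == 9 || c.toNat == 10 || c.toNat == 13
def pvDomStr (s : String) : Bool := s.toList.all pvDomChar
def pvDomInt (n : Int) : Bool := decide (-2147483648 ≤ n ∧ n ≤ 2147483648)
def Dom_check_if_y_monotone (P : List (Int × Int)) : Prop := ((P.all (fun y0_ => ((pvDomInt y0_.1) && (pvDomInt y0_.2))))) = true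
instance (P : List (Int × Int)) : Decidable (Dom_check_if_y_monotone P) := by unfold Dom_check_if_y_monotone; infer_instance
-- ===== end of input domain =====

-- B replaces A's seven passes (two max/min scans, an enumerate loop, two while-loops that
-- materialise chain index lists, two chain checks) by one combined extrema scan plus a single
-- pass over the n cyclic edges with a modular-arithmetic arc test (objective: alternative).

-- ===== PORT A =====
-- P[i][1] (indices are always in range where A runs them)
def pvY (P : List (Int × Int)) (i : Int) : Int := (PySem.List.pyGetD P i ((0 : Int), (0 : Int))).2

-- A's 'while True: chain.append(i); if i == i_min: break; i = next(i)'.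
-- fuel only makes the recursion structural; the loop takes at most n steps, fuel = n+1 suffices.
def pvChain (next : Int → Int) (imin : Int) : Nat → Int → List Int
  | 0, _ => []
  | fuel + 1, i => i :: (if i = imin then [] else pvChain next imin fuel (next i))

-- A's 'for i in range(1, len(chain)): if P[chain[i]][1] > P[chain[i-1]][1]: return False'
def pvChainDescends (P : List (Int × Int)) (chain : List Int) : Bool :=
  (PySem.List.pyRange 1 chain.length 1).all fun i =>
    !(pvY P (PySem.List.pyGetD chain i 0) > pvY P (PySem.List.pyGetD chain (i - 1) 0))

def check_if_y_monotone (P : List (Int × Int)) : Bool :=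
  -- 'P[0][1]' raises IndexError on empty P: outside Pre_; the port returns false there
  if P.isEmpty then false else
  let n : Int := P.length
  let max_y := pvY P 0
  let min_y := pvY P 0
  let iM0 := (PySem.List.max? (PySem.List.pyRange 0 n 1) (fun i => pvY P i)).getD 0
  let im0 := (PySem.List.min? (PySem.List.pyRange 0 n 1) (fun i => pvY P i)).getD 0
  let st := (PySem.List.enumerate P 0).foldl
    (fun (s : Int × Int × Int × Int) ip =>
      let s1 := if ip.2.2 > s.1 then (ip.2.2, ip.1, s.2.2.1, s.2.2.2) else s
      if ip.2.2 < s1.2.2.1 then (s1.1, s1.2.1, ip.2.2, ip.1) else s1)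
    (max_y, iM0, min_y, im0)
  let i_max := st.2.1
  let i_min := st.2.2.2
  let left_chain := pvChain (fun i => PySem.Int.mod (i + 1) n) i_min (n.toNat + 1) i_max
  let right_chain := pvChain (fun i => PySem.Int.mod (i - 1 + n) n) i_min (n.toNat + 1) i_max
  if !(pvChainDescends P left_chain) then false
  else if !(pvChainDescends P right_chain) then false
  else true

-- ===== PORT B =====
-- B's first loop: one pass computing (first argmax index, first argmin index) of y
def pvExtrema (P : List (Int × Int)) : Int × Int :=
  (PySem.List.pyRange 1 P.length 1).foldl
    (fun s i =>
      (if pvY P i > pvY P s.1 then i else s.1,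
       if pvY P i < pvY P s.2 then i else s.2))
    (0, 0)

def check_if_y_monotone_alt (P : List (Int × Int)) : Bool :=
  let iM := (pvExtrema P).1
  let im := (pvExtrema P).2
  let n : Int := P.length
  let down := PySem.Int.mod (im - iM) n  -- '% n' raises ZeroDivisionError on empty P: outside Pre_
  (PySem.List.pyRange 0 n 1).all fun i =>
    let d := pvY P (PySem.Int.mod (i + 1) n) - pvY P i
    !((decide (PySem.Int.mod (i - iM) n < down) && decide (d > 0)) ||
      (decide (down ≤ PySem.Int.mod (i - iM) n) && decide (d < 0)))

-- ===== PRECONDITION & SPEC =====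
-- A raises IndexError on the empty list (P[0]); B raises ZeroDivisionError there too.
def Pre_check_if_y_monotone (P : List (Int × Int)) : Prop := P ≠ []
instance (P : List (Int × Int)) : Decidable (Pre_check_if_y_monotone P) := by unfold Pre_check_if_y_monotone; infer_instance
def pvWitness_check_if_y_monotone : (List (Int × Int)) := [(0, 0), (1, 3), (2, 1)]

def Spec_check_if_y_monotone (P : List (Int × Int)) (out : Bool) : Prop := out = check_if_y_monotone_alt P
instance (P : List (Int × Int)) (out : Bool) : Decidable (Spec_check_if_y_monotone P out) := by unfold Spec_check_if_y_monotone; infer_instance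

-- ===== CLAIM (what is proved, stated in full; the proofs are below) =====
def Claim_equal_check_if_y_monotone : Prop := ∀ (P : List (Int × Int)), Dom_check_if_y_monotone P → Pre_check_if_y_monotone P → Spec_check_if_y_monotone P (check_if_y_monotone P)

-- ===== LEMMAS AND PROOFS =====

-- i is the first index attaining the maximum (resp. minimum) y among the indices [0, n)
def pvIsFirstMax (P : List (Int × Int)) (i : Int) : Prop :=
  0 ≤ i ∧ i < P.length ∧ (∀ j : Int, 0 ≤ j → j < P.length → pvY P j ≤ pvY P i) ∧
    (∀ j : Int, 0 ≤ j → j < i → pvY P j < pvY P i)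

def pvIsFirstMin (P : List (Int × Int)) (i : Int) : Prop :=
  0 ≤ i ∧ i < P.length ∧ (∀ j : Int, 0 ≤ j → j < P.length → pvY P i ≤ pvY P j) ∧
    (∀ j : Int, 0 ≤ j → j < i → pvY P i < pvY P j)

theorem pvFirstMax_unique {P : List (Int × Int)} {a b : Int}
    (ha : pvIsFirstMax P a) (hb : pvIsFirstMax P b) : a = b := by
  obtain ⟨ha0, han, hamax, hafirst⟩ := ha
  obtain ⟨hb0, hbn, hbmax, hbfirst⟩ := hb
  rcases lt_trichotomy a b with h | h | h
  · have h1 := hbfirst a ha0 h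
    have h2 := hamax b hb0 hbn
    omega
  · exact h
  · have h1 := hafirst b hb0 h
    have h2 := hbmax a ha0 han
    omega

theorem pvFirstMin_unique {P : List (Int × Int)} {a b : Int}
    (ha : pvIsFirstMin P a) (hb : pvIsFirstMin P b) : a = b := by
  obtain ⟨ha0, han, hamax, hafirst⟩ := ha
  obtain ⟨hb0, hbn, hbmax, hbfirst⟩ := hb
  rcases lt_trichotomy a b with h | h | h
  · have h1 := hbfirst a ha0 h
    have h2 := hamax b hb0 hbn
    omega
  · exact h
  · have h1 := hafirst b hb0 h
    have h2 := hbmax a ha0 han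
    omega

def pvPrefFM (P : List (Int × Int)) (k i : Int) : Prop :=
  0 ≤ i ∧ i < k ∧ (∀ j : Int, 0 ≤ j → j < k → pvY P j ≤ pvY P i) ∧
    (∀ j : Int, 0 ≤ j → j < i → pvY P j < pvY P i)
def pvPrefFm (P : List (Int × Int)) (k i : Int) : Prop :=
  0 ≤ i ∧ i < k ∧ (∀ j : Int, 0 ≤ j → j < k → pvY P i ≤ pvY P j) ∧
    (∀ j : Int, 0 ≤ j → j < i → pvY P i < pvY P j)

theorem pvExtrema_fold (P : List (Int × Int)) (k : Nat) (hk : 1 ≤ k) :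
    pvPrefFM P k ((PySem.List.pyRange 1 k 1).foldl
      (fun s i =>
        (if pvY P i > pvY P s.1 then i else s.1,
         if pvY P i < pvY P s.2 then i else s.2)) (0, 0)).1 ∧
    pvPrefFm P k ((PySem.List.pyRange 1 k 1).foldl
      (fun s i =>
        (if pvY P i > pvY P s.1 then i else s.1,
         if pvY P i < pvY P s.2 then i else s.2)) (0, 0)).2 := by
  induction k with
  | zero => omega
  | succ k ih =>
    rcases Nat.lt_or_ge k 1 with h1 | h1
    · have hk1 : k = 0 := by omega
      subst hk1
      rw [PySem.List.pyRange_one_eq_nil (by norm_num)]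
      simp only [List.foldl_nil]
      refine ⟨⟨le_refl 0, by norm_num, ?_, ?_⟩, ⟨le_refl 0, by norm_num, ?_, ?_⟩⟩
      · intro j hj0 hj1
        have hj : j = 0 := by omega
        subst hj
        exact le_refl _
      · intro j hj0 hj1; omega
      · intro j hj0 hj1
        have hj : j = 0 := by omega
        subst hj
        exact le_refl _
      · intro j hj0 hj1; omega
    · have hcast : ((k + 1 : Nat) : Int) = (k : Int) + 1 := by push_cast; ring
      rw [hcast, PySem.List.pyRange_one_succ_right (by exact_mod_cast h1), List.foldl_append]
      obtain ⟨⟨hM0, hMk, hMmax, hMfirst⟩, ⟨hm0, hmk, hmmin, hmfirst⟩⟩ := ih h1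
      set s := ((PySem.List.pyRange 1 k 1).foldl
        (fun s i =>
          (if pvY P i > pvY P s.1 then i else s.1,
           if pvY P i < pvY P s.2 then i else s.2)) (0, 0)) with hs
      simp only [List.foldl_cons, List.foldl_nil]
      constructor
      · split_ifs with h
        · refine ⟨by omega, by omega, ?_, ?_⟩
          · intro j hj0 hjk
            rcases lt_or_ge j (k : Int) with hj | hj
            · have := hMmax j hj0 hj; omega
            · have : j = (k : Int) := by omega
              simp [this]
          · intro j hj0 hjk
            have := hMmax j hj0 hjk; omega
        · refine ⟨hM0, by omega, ?_, hMfirst⟩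
          intro j hj0 hjk
          rcases lt_or_ge j (k : Int) with hj | hj
          · exact hMmax j hj0 hj
          · have : j = (k : Int) := by omega
            subst this; omega
      · split_ifs with h
        · refine ⟨by omega, by omega, ?_, ?_⟩
          · intro j hj0 hjk
            rcases lt_or_ge j (k : Int) with hj | hj
            · have := hmmin j hj0 hj; omega
            · have : j = (k : Int) := by omega
              simp [this]
          · intro j hj0 hjk
            have := hmmin j hj0 hjk; omega
        · refine ⟨hm0, by omega, ?_, hmfirst⟩
          intro j hj0 hjk
          rcases lt_or_ge j (k : Int) with hj | hj
          · exact hmmin j hj0 hj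
          · have : j = (k : Int) := by omega
            subst this; omega

theorem pvExtrema_spec (P : List (Int × Int)) (hP : P ≠ []) :
    pvIsFirstMax P (pvExtrema P).1 ∧ pvIsFirstMin P (pvExtrema P).2 := by
  have hlen : 1 ≤ P.length := List.length_pos_iff.mpr hP
  have := pvExtrema_fold P P.length hlen
  exact ⟨this.1, this.2⟩

theorem pvMax?_append (l : List Int) (x : Int) (key : Int → Int) (m : Int)
    (h : PySem.List.max? l key = some m) :
    PySem.List.max? (l ++ [x]) key = if key m < key x then some x else some m := by
  unfold PySem.List.max? at *
  rw [List.foldl_append, h]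
  rfl

theorem pvMin?_append (l : List Int) (x : Int) (key : Int → Int) (m : Int)
    (h : PySem.List.min? l key = some m) :
    PySem.List.min? (l ++ [x]) key = if key x < key m then some x else some m := by
  unfold PySem.List.min? at *
  rw [List.foldl_append, h]
  rfl

-- max?(range(0,k), key) is the first index attaining the prefix maximum
theorem pvMax?_pyRange (P : List (Int × Int)) (k : Nat) (hk : 1 ≤ k) :
    ∃ m : Int, PySem.List.max? (PySem.List.pyRange 0 k 1) (fun i => pvY P i) = some m ∧
      0 ≤ m ∧ m < (k : Int) ∧ (∀ j : Int, 0 ≤ j → j < (k : Int) → pvY P j ≤ pvY P m) ∧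
      (∀ j : Int, 0 ≤ j → j < m → pvY P j < pvY P m) := by
  induction k with
  | zero => omega
  | succ k ih =>
    rcases Nat.lt_or_ge k 1 with h1 | h1
    · have hk0 : k = 0 := by omega
      subst hk0
      refine ⟨0, by rfl, le_refl 0, by norm_num, ?_, ?_⟩
      · intro j hj0 hj1
        have hj : j = 0 := by omega
        subst hj; exact le_refl _
      · intro j hj0 hj1; omega
    · obtain ⟨m, hm, hm0, hmk, hmmax, hmfirst⟩ := ih h1
      have hcast : ((k + 1 : Nat) : Int) = (k : Int) + 1 := by push_cast; ring
      rw [hcast, PySem.List.pyRange_one_succ_right (by exact_mod_cast Nat.zero_le k)]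
      rw [pvMax?_append _ _ _ _ hm]
      split_ifs with h
      · refine ⟨(k : Int), rfl, by omega, by omega, ?_, ?_⟩
        · intro j hj0 hjk
          rcases lt_or_ge j (k : Int) with hj | hj
          · have := hmmax j hj0 hj; omega
          · have hj' : j = (k : Int) := by omega
            subst hj'; exact le_refl _
        · intro j hj0 hjk
          have := hmmax j hj0 hjk; omega
      · refine ⟨m, rfl, hm0, by omega, ?_, hmfirst⟩
        intro j hj0 hjk
        rcases lt_or_ge j (k : Int) with hj | hj
        · exact hmmax j hj0 hj
        · have hj' : j = (k : Int) := by omega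
          subst hj'; omega

theorem pvMin?_pyRange (P : List (Int × Int)) (k : Nat) (hk : 1 ≤ k) :
    ∃ m : Int, PySem.List.min? (PySem.List.pyRange 0 k 1) (fun i => pvY P i) = some m ∧
      0 ≤ m ∧ m < (k : Int) ∧ (∀ j : Int, 0 ≤ j → j < (k : Int) → pvY P m ≤ pvY P j) ∧
      (∀ j : Int, 0 ≤ j → j < m → pvY P m < pvY P j) := by
  induction k with
  | zero => omega
  | succ k ih =>
    rcases Nat.lt_or_ge k 1 with h1 | h1
    · have hk0 : k = 0 := by omega
      subst hk0
      refine ⟨0, by rfl, le_refl 0, by norm_num, ?_, ?_⟩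
      · intro j hj0 hj1
        have hj : j = 0 := by omega
        subst hj; exact le_refl _
      · intro j hj0 hj1; omega
    · obtain ⟨m, hm, hm0, hmk, hmmin, hmfirst⟩ := ih h1
      have hcast : ((k + 1 : Nat) : Int) = (k : Int) + 1 := by push_cast; ring
      rw [hcast, PySem.List.pyRange_one_succ_right (by exact_mod_cast Nat.zero_le k)]
      rw [pvMin?_append _ _ _ _ hm]
      split_ifs with h
      · refine ⟨(k : Int), rfl, by omega, by omega, ?_, ?_⟩
        · intro j hj0 hjk
          rcases lt_or_ge j (k : Int) with hj | hj
          · have := hmmin j hj0 hj; omega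
          · have hj' : j = (k : Int) := by omega
            subst hj'; exact le_refl _
        · intro j hj0 hjk
          have := hmmin j hj0 hjk; omega
      · refine ⟨m, rfl, hm0, by omega, ?_, hmfirst⟩
        intro j hj0 hjk
        rcases lt_or_ge j (k : Int) with hj | hj
        · exact hmmin j hj0 hj
        · have hj' : j = (k : Int) := by omega
          subst hj'; omega

def pvStepA (P : List (Int × Int)) (s : Int × Int × Int × Int) (j : Int) : Int × Int × Int × Int :=
  let s1 := if pvY P j > s.1 then (pvY P j, j, s.2.2.1, s.2.2.2) else s
  if pvY P j < s1.2.2.1 then (s1.1, s1.2.1, pvY P j, j) else s1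

theorem pvStepA_inv (P : List (Int × Int)) (iM0 im0 : Int) :
    ∀ k : Nat, k ≤ P.length →
    ∀ st : Int × Int × Int × Int,
      st = (PySem.List.pyRange 0 k 1).foldl (pvStepA P) (pvY P 0, iM0, pvY P 0, im0) →
      (∀ j : Int, 0 ≤ j → j < (k : Int) → pvY P j ≤ st.1) ∧
      ((st.1 = pvY P 0 ∧ st.2.1 = iM0) ∨
        (0 ≤ st.2.1 ∧ st.2.1 < (k : Int) ∧ st.1 = pvY P st.2.1 ∧
          ∀ j : Int, 0 ≤ j → j < st.2.1 → pvY P j < st.1)) ∧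
      (∀ j : Int, 0 ≤ j → j < (k : Int) → st.2.2.1 ≤ pvY P j) ∧
      ((st.2.2.1 = pvY P 0 ∧ st.2.2.2 = im0) ∨
        (0 ≤ st.2.2.2 ∧ st.2.2.2 < (k : Int) ∧ st.2.2.1 = pvY P st.2.2.2 ∧
          ∀ j : Int, 0 ≤ j → j < st.2.2.2 → st.2.2.1 < pvY P j)) := by
  intro k
  induction k with
  | zero =>
    intro _ st hst
    rw [PySem.List.pyRange_one_eq_nil (by norm_num), List.foldl_nil] at hst
    subst hst
    refine ⟨by intro j h1 h2; omega, Or.inl ⟨rfl, rfl⟩, by intro j h1 h2; omega, Or.inl ⟨rfl, rfl⟩⟩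
  | succ k ih =>
    intro hk st hst
    have hcast : ((k + 1 : Nat) : Int) = (k : Int) + 1 := by push_cast; ring
    rw [hcast, PySem.List.pyRange_one_succ_right (by exact_mod_cast Nat.zero_le k),
      List.foldl_append, List.foldl_cons, List.foldl_nil] at hst
    obtain ⟨hmax, hM, hmin, hm⟩ := ih (by omega) _ rfl
    set prev := (PySem.List.pyRange 0 k 1).foldl (pvStepA P) (pvY P 0, iM0, pvY P 0, im0) with hprev
    unfold pvStepA at hst
    by_cases c1 : pvY P (k : Int) > prev.1
    · rw [if_pos c1] at hst
      simp only at hst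
      by_cases c2 : pvY P (k : Int) < prev.2.2.1
      · rw [if_pos c2] at hst
        subst hst
        try dsimp only
        refine ⟨?_, Or.inr ⟨by omega, by omega, rfl, ?_⟩, ?_, Or.inr ⟨by omega, by omega, rfl, ?_⟩⟩
        · intro j h1 h2
          rcases lt_or_ge j (k : Int) with hj | hj
          · have := hmax j h1 hj; omega
          · have hj' : j = (k : Int) := by omega
            subst hj'; exact le_refl _
        · intro j h1 h2
          have := hmax j h1 h2; omega
        · intro j h1 h2
          rcases lt_or_ge j (k : Int) with hj | hj
          · have := hmin j h1 hj; omega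
          · have hj' : j = (k : Int) := by omega
            subst hj'; exact le_refl _
        · intro j h1 h2
          have := hmin j h1 h2; omega
      · rw [if_neg c2] at hst
        subst hst
        try dsimp only
        refine ⟨?_, Or.inr ⟨by omega, by omega, rfl, ?_⟩, ?_, ?_⟩
        · intro j h1 h2
          rcases lt_or_ge j (k : Int) with hj | hj
          · have := hmax j h1 hj; omega
          · have hj' : j = (k : Int) := by omega
            subst hj'; exact le_refl _
        · intro j h1 h2
          have := hmax j h1 h2; omega
        · intro j h1 h2
          rcases lt_or_ge j (k : Int) with hj | hj
          · exact hmin j h1 hj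
          · have hj' : j = (k : Int) := by omega
            subst hj'; omega
        · rcases hm with h | h
          · exact Or.inl h
          · exact Or.inr ⟨h.1, by omega, h.2.2.1, h.2.2.2⟩
    · rw [if_neg c1] at hst
      by_cases c2 : pvY P (k : Int) < prev.2.2.1
      · rw [if_pos c2] at hst
        subst hst
        try dsimp only
        refine ⟨?_, ?_, ?_, Or.inr ⟨by omega, by omega, rfl, ?_⟩⟩
        · intro j h1 h2
          rcases lt_or_ge j (k : Int) with hj | hj
          · exact hmax j h1 hj
          · have hj' : j = (k : Int) := by omega
            subst hj'; omega
        · rcases hM with h | h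
          · exact Or.inl h
          · exact Or.inr ⟨h.1, by omega, h.2.2.1, h.2.2.2⟩
        · intro j h1 h2
          rcases lt_or_ge j (k : Int) with hj | hj
          · have := hmin j h1 hj; omega
          · have hj' : j = (k : Int) := by omega
            subst hj'; exact le_refl _
        · intro j h1 h2
          have := hmin j h1 h2; omega
      · rw [if_neg c2] at hst
        subst hst
        try dsimp only
        refine ⟨?_, ?_, ?_, ?_⟩
        · intro j h1 h2
          rcases lt_or_ge j (k : Int) with hj | hj
          · exact hmax j h1 hj
          · have hj' : j = (k : Int) := by omega
            subst hj'; omega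
        · rcases hM with h | h
          · exact Or.inl h
          · exact Or.inr ⟨h.1, by omega, h.2.2.1, h.2.2.2⟩
        · intro j h1 h2
          rcases lt_or_ge j (k : Int) with hj | hj
          · exact hmin j h1 hj
          · have hj' : j = (k : Int) := by omega
            subst hj'; omega
        · rcases hm with h | h
          · exact Or.inl h
          · exact Or.inr ⟨h.1, by omega, h.2.2.1, h.2.2.2⟩

theorem pvAfold (P : List (Int × Int)) (hP : P ≠ []) (iM0 im0 : Int)
    (hM0 : pvIsFirstMax P iM0) (hm0 : pvIsFirstMin P im0) :
    pvIsFirstMax P (((PySem.List.enumerate P 0).foldl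
      (fun (s : Int × Int × Int × Int) ip =>
        let s1 := if ip.2.2 > s.1 then (ip.2.2, ip.1, s.2.2.1, s.2.2.2) else s
        if ip.2.2 < s1.2.2.1 then (s1.1, s1.2.1, ip.2.2, ip.1) else s1)
      (pvY P 0, iM0, pvY P 0, im0)).2.1) ∧
    pvIsFirstMin P (((PySem.List.enumerate P 0).foldl
      (fun (s : Int × Int × Int × Int) ip =>
        let s1 := if ip.2.2 > s.1 then (ip.2.2, ip.1, s.2.2.1, s.2.2.2) else s
        if ip.2.2 < s1.2.2.1 then (s1.1, s1.2.1, ip.2.2, ip.1) else s1)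
      (pvY P 0, iM0, pvY P 0, im0)).2.2.2) := by
  rw [PySem.List.enumerate_eq_map_pyRange P ((0 : Int), (0 : Int)), List.foldl_map]
  have hfun : (fun (x : Int × Int × Int × Int) (y : Int) =>
      (fun (s : Int × Int × Int × Int) (ip : Int × Int × Int) =>
        let s1 := if ip.2.2 > s.1 then (ip.2.2, ip.1, s.2.2.1, s.2.2.2) else s
        if ip.2.2 < s1.2.2.1 then (s1.1, s1.2.1, ip.2.2, ip.1) else s1) x
        (y, PySem.List.pyGetD P y ((0 : Int), (0 : Int)))) = pvStepA P := by
    funext s j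
    simp [pvStepA, pvY]
  rw [hfun]
  have hlen : 1 ≤ P.length := List.length_pos_iff.mpr hP
  obtain ⟨hmax, hM, hmin, hm⟩ := pvStepA_inv P iM0 im0 P.length (le_refl _) _ rfl
  simp only [PySem.List.len_eq] at *
  constructor
  · rcases hM with h | h
    · rw [h.2]; exact hM0
    · exact ⟨h.1, h.2.1, fun j h1 h2 => by rw [← h.2.2.1]; exact hmax j h1 h2,
        fun j h1 h2 => by rw [← h.2.2.1]; exact h.2.2.2 j h1 h2⟩
  · rcases hm with h | h
    · rw [h.2]; exact hm0
    · exact ⟨h.1, h.2.1, fun j h1 h2 => by rw [← h.2.2.1]; exact hmin j h1 h2,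
        fun j h1 h2 => by rw [← h.2.2.1]; exact h.2.2.2 j h1 h2⟩

theorem pvAddEmodL (a b n : Int) : (a % n + b) % n = (a + b) % n := by
  rw [Int.add_emod, Int.emod_emod_of_dvd _ dvd_rfl, ← Int.add_emod]

theorem pvSubEmodL (a b n : Int) : (a % n - b) % n = (a - b) % n := by
  rw [Int.sub_emod, Int.emod_emod_of_dvd _ dvd_rfl, ← Int.sub_emod]

theorem pvSubEmodR (a b n : Int) : (a - b % n) % n = (a - b) % n := by
  rw [Int.sub_emod, Int.emod_emod_of_dvd _ dvd_rfl, ← Int.sub_emod]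

theorem pvEmodEq {n a c : Int} (h0 : 0 ≤ c) (h1 : c < n) (q : Int) (h : a = c + q * n) :
    a % n = c := by
  subst h
  rw [Int.add_mul_emod_self_right]
  exact Int.emod_eq_of_lt h0 h1

theorem pvEmodDecomp (a n : Int) : ∃ q : Int, a = a % n + q * n := by
  refine ⟨a / n, ?_⟩
  have h := Int.emod_add_mul_ediv a n
  linarith [h]

theorem pvChain_fwd (n im : Int) (him0 : 0 ≤ im) (himn : im < n) :
    ∀ (fuel : Nat) (i : Int), 0 ≤ i → i < n → ((im - i) % n).toNat < fuel →
    pvChain (fun i => PySem.Int.mod (i + 1) n) im fuel i =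
      (List.range (((im - i) % n).toNat + 1)).map (fun k : Nat => (i + (k : Int)) % n) := by
  intro fuel
  induction fuel with
  | zero => intro i _ _ h; omega
  | succ fuel ih =>
    intro i hi0 hin hfuel
    have hn : 0 < n := by omega
    have hmod0 : 0 ≤ (im - i) % n := Int.emod_nonneg _ (by omega)
    have hmodn : (im - i) % n < n := Int.emod_lt_of_pos _ hn
    simp only [pvChain]
    by_cases heq : i = im
    · subst heq
      rw [if_pos rfl]
      simp [Int.emod_eq_of_lt hi0 hin]
    · rw [if_neg heq]
      have hdpos : 0 < (im - i) % n := by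
        rcases lt_trichotomy i im with h | h | h
        · rw [Int.emod_eq_of_lt (by omega) (by omega)]; omega
        · exact absurd h heq
        · rw [pvEmodEq (c := im - i + n) (by omega) (by omega) (-1) (by ring)]
          omega
      set d := (im - i) % n with hd
      have hm : PySem.Int.mod (i + 1) n = (i + 1) % n := PySem.Int.mod_eq_emod_of_pos hn
      rw [hm]
      have hi1 : 0 ≤ (i + 1) % n := Int.emod_nonneg _ (by omega)
      have hi1n : (i + 1) % n < n := Int.emod_lt_of_pos _ hn
      obtain ⟨q, hq⟩ := pvEmodDecomp (im - i) n
      rw [← hd] at hq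
      have hd' : (im - (i + 1) % n) % n = d - 1 := by
        rw [pvSubEmodR]
        exact pvEmodEq (by omega) (by omega) q (by linear_combination hq)
      rw [ih ((i + 1) % n) hi1 hi1n (by omega), hd']
      have htn : (d - 1).toNat + 1 = d.toNat := by omega
      rw [htn, List.range_succ_eq_map, List.map_cons, List.map_map]
      have hhead : (i + ((0 : Nat) : Int)) % n = i := by
        simpa using Int.emod_eq_of_lt hi0 hin
      rw [hhead]
      congr 1
      apply List.map_congr_left
      intro k _
      simp only [Function.comp_apply]
      rw [pvAddEmodL]
      congr 1
      push_cast
      ring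

theorem pvChain_bwd (n im : Int) (him0 : 0 ≤ im) (himn : im < n) :
    ∀ (fuel : Nat) (i : Int), 0 ≤ i → i < n → ((i - im) % n).toNat < fuel →
    pvChain (fun i => PySem.Int.mod (i - 1 + n) n) im fuel i =
      (List.range (((i - im) % n).toNat + 1)).map (fun k : Nat => (i - (k : Int)) % n) := by
  intro fuel
  induction fuel with
  | zero => intro i _ _ h; omega
  | succ fuel ih =>
    intro i hi0 hin hfuel
    have hn : 0 < n := by omega
    have hmod0 : 0 ≤ (i - im) % n := Int.emod_nonneg _ (by omega)
    have hmodn : (i - im) % n < n := Int.emod_lt_of_pos _ hn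
    simp only [pvChain]
    by_cases heq : i = im
    · subst heq
      rw [if_pos rfl]
      simp [Int.emod_eq_of_lt hi0 hin]
    · rw [if_neg heq]
      have hdpos : 0 < (i - im) % n := by
        rcases lt_trichotomy im i with h | h | h
        · rw [Int.emod_eq_of_lt (by omega) (by omega)]; omega
        · exact absurd h.symm heq
        · rw [pvEmodEq (c := i - im + n) (by omega) (by omega) (-1) (by ring)]
          omega
      set u := (i - im) % n with hu
      have hm : PySem.Int.mod (i - 1 + n) n = (i - 1 + n) % n := PySem.Int.mod_eq_emod_of_pos hn
      rw [hm]
      have hi1 : 0 ≤ (i - 1 + n) % n := Int.emod_nonneg _ (by omega)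
      have hi1n : (i - 1 + n) % n < n := Int.emod_lt_of_pos _ hn
      obtain ⟨q, hq⟩ := pvEmodDecomp (i - im) n
      rw [← hu] at hq
      have hu' : ((i - 1 + n) % n - im) % n = u - 1 := by
        rw [pvSubEmodL]
        exact pvEmodEq (by omega) (by omega) (q + 1) (by linear_combination hq)
      rw [ih ((i - 1 + n) % n) hi1 hi1n (by omega), hu']
      have htn : (u - 1).toNat + 1 = u.toNat := by omega
      rw [htn, List.range_succ_eq_map, List.map_cons, List.map_map]
      have hhead : (i - ((0 : Nat) : Int)) % n = i := by
        simpa using Int.emod_eq_of_lt hi0 hin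
      rw [hhead]
      congr 1
      apply List.map_congr_left
      intro k _
      simp only [Function.comp_apply]
      rw [pvSubEmodL,
        show i - 1 + n - (k : Int) = (i - ((k.succ : Nat) : Int)) + 1 * n from by push_cast; ring,
        Int.add_mul_emod_self_right]

theorem pvEmodCongr {n a b : Int} (q : Int) (h : a = b + q * n) : a % n = b % n := by
  rw [h, Int.add_mul_emod_self_right]

theorem pvArc (P : List (Int × Int)) (iM im : Int)
    (hM : pvIsFirstMax P iM) (hm : pvIsFirstMin P im) :
    ((∀ k : Nat, 1 ≤ k → (k : Int) ≤ (im - iM) % (P.length : Int) →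
        pvY P ((iM + k) % (P.length : Int)) ≤ pvY P ((iM + k - 1) % (P.length : Int))) ∧
     (∀ k : Nat, 1 ≤ k → (k : Int) ≤ (iM - im) % (P.length : Int) →
        pvY P ((iM - k) % (P.length : Int)) ≤ pvY P ((iM - k + 1) % (P.length : Int))))
    ↔ (∀ i : Int, 0 ≤ i → i < (P.length : Int) →
        ((i - iM) % (P.length : Int) < (im - iM) % (P.length : Int) →
          pvY P ((i + 1) % (P.length : Int)) ≤ pvY P i) ∧
        ((im - iM) % (P.length : Int) ≤ (i - iM) % (P.length : Int) →
          pvY P i ≤ pvY P ((i + 1) % (P.length : Int)))) := by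
  obtain ⟨hM0, hMn, hMmax, hMfirst⟩ := hM
  obtain ⟨hm0, hmn, hmmin, hmfirst⟩ := hm
  set n : Int := (P.length : Int) with hnn
  have hn : 0 < n := by omega
  by_cases hMm : iM = im
  · -- first argmax = first argmin : every y is equal; both sides hold trivially
    subst hMm
    have hall : ∀ j : Int, 0 ≤ j → j < n → pvY P j = pvY P iM := by
      intro j h1 h2
      have := hMmax j h1 h2
      have := hmmin j h1 h2
      omega
    have hz : (iM - iM) % n = 0 := by simp
    constructor
    · intro _ i hi0 hin
      have he1 : 0 ≤ (i + 1) % n := Int.emod_nonneg _ (by omega)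
      have he2 : (i + 1) % n < n := Int.emod_lt_of_pos _ hn
      rw [hz]
      constructor
      · intro h
        rw [hall _ he1 he2, hall _ hi0 hin]
      · intro _
        rw [hall _ he1 he2, hall _ hi0 hin]
    · intro _
      rw [hz]
      refine ⟨?_, ?_⟩
      · intro k hk1 hk2; omega
      · intro k hk1 hk2
        have hkz : (k : Int) ≤ 0 := hk2
        omega
  · -- iM ≠ im : the two arcs partition the n cyclic edges
    set d : Int := (im - iM) % n with hdd
    set u : Int := (iM - im) % n with huu
    have hd0 : 0 ≤ d := Int.emod_nonneg _ (by omega)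
    have hdn : d < n := Int.emod_lt_of_pos _ hn
    have hu0 : 0 ≤ u := Int.emod_nonneg _ (by omega)
    have hun : u < n := Int.emod_lt_of_pos _ hn
    obtain ⟨q1, hq1⟩ := pvEmodDecomp (im - iM) n
    obtain ⟨q2, hq2⟩ := pvEmodDecomp (iM - im) n
    rw [← hdd] at hq1
    rw [← huu] at hq2
    have hdne : d ≠ 0 := by
      intro h
      rw [h] at hq1
      have h' : im - iM = q1 * n := by omega
      rcases lt_trichotomy q1 0 with hq | hq | hq
      · nlinarith
      · rw [hq] at h'; simp at h'; omega
      · nlinarith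
    have hune : u ≠ 0 := by
      intro h
      rw [h] at hq2
      have h' : iM - im = q2 * n := by omega
      rcases lt_trichotomy q2 0 with hq | hq | hq
      · nlinarith
      · rw [hq] at h'; simp at h'; omega
      · nlinarith
    have hdpos : 0 < d := by omega
    have hupos : 0 < u := by omega
    have hdu : d + u = n := by
      have hsum : d + u = -(q1 + q2) * n := by linarith
      set c : Int := -(q1 + q2) with hcc
      rcases lt_trichotomy c 1 with h | h | h
      · have hc0 : c ≤ 0 := by omega
        have : c * n ≤ 0 := mul_nonpos_of_nonpos_of_nonneg hc0 (le_of_lt hn)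
        omega
      · rw [h] at hsum; omega
      · have hc2 : (2 : Int) ≤ c := by omega
        have : 2 * n ≤ c * n := mul_le_mul_of_nonneg_right hc2 (le_of_lt hn)
        omega
    constructor
    · -- chains descend → every edge respects its arc
      rintro ⟨hL, hR⟩ i hi0 hin
      set r : Int := (i - iM) % n with hrr
      have hr0 : 0 ≤ r := Int.emod_nonneg _ (by omega)
      have hrn : r < n := Int.emod_lt_of_pos _ hn
      obtain ⟨q3, hq3⟩ := pvEmodDecomp (i - iM) n
      rw [← hrr] at hq3
      constructor
      · intro hrd
        have hk := hL (r.toNat + 1) (by omega) (by omega)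
        have hc : ((r.toNat + 1 : Nat) : Int) = r + 1 := by omega
        rw [hc] at hk
        have h1 : (iM + (r + 1)) % n = (i + 1) % n := pvEmodCongr (-q3) (by linarith)
        have h2 : (iM + (r + 1) - 1) % n = i := by
          rw [show iM + (r + 1) - 1 = iM + r from by ring]
          exact pvEmodEq hi0 hin (-q3) (by linarith)
        rw [h1, h2] at hk
        exact hk
      · intro hdr
        have hk := hR (n - r).toNat (by omega) (by omega)
        have hc : (((n - r).toNat : Nat) : Int) = n - r := by omega
        rw [hc] at hk
        have h1 : (iM - (n - r)) % n = i := by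
          rw [show iM - (n - r) = iM + r - n from by ring]
          exact pvEmodEq hi0 hin (-q3 - 1) (by linarith)
        have h2 : (iM - (n - r) + 1) % n = (i + 1) % n := pvEmodCongr (-q3 - 1) (by linarith)
        rw [h1, h2] at hk
        exact hk
    · -- every edge respects its arc → chains descend
      intro hB
      constructor
      · intro k hk1 hkd
        set i := (iM + (k : Int) - 1) % n with hii
        have hi0 : 0 ≤ i := Int.emod_nonneg _ (by omega)
        have hin : i < n := Int.emod_lt_of_pos _ hn
        obtain ⟨q, hq⟩ := pvEmodDecomp (iM + (k : Int) - 1) n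
        rw [← hii] at hq
        have hr : (i - iM) % n = (k : Int) - 1 :=
          pvEmodEq (by omega) (by omega) (-q) (by linarith)
        have hb := hB i hi0 hin
        have h1 := hb.1 (by omega)
        have h2 : (i + 1) % n = (iM + (k : Int)) % n := pvEmodCongr (-q) (by linarith)
        rw [h2] at h1
        exact h1
      · intro k hk1 hku
        set i := (iM - (k : Int)) % n with hii
        have hi0 : 0 ≤ i := Int.emod_nonneg _ (by omega)
        have hin : i < n := Int.emod_lt_of_pos _ hn
        obtain ⟨q, hq⟩ := pvEmodDecomp (iM - (k : Int)) n
        rw [← hii] at hq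
        have hr : (i - iM) % n = n - (k : Int) :=
          pvEmodEq (by omega) (by omega) (-q - 1) (by linarith)
        have hb := hB i hi0 hin
        have h1 := hb.2 (by omega)
        have h2 : (i + 1) % n = (iM - (k : Int) + 1) % n := pvEmodCongr (-q) (by linarith)
        rw [h2] at h1
        exact h1


theorem pvGetMapRange (D : Nat) (f : Nat → Int) (i : Int) (h0 : 0 ≤ i) (h1 : i ≤ (D : Int)) :
    PySem.List.pyGetD ((List.range (D + 1)).map f) i 0 = f i.toNat := by
  rw [PySem.List.pyGetD_eq_getElem _ _ h0 (by simp; omega)]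
  simp

theorem pvDescends_iff (P : List (Int × Int)) (D : Nat) (f : Nat → Int) :
    pvChainDescends P ((List.range (D + 1)).map f) = true ↔
      ∀ k : Nat, 1 ≤ k → k ≤ D → pvY P (f k) ≤ pvY P (f (k - 1)) := by
  unfold pvChainDescends
  rw [List.all_eq_true]
  constructor
  · intro h k hk1 hkD
    have hmem : (k : Int) ∈ PySem.List.pyRange 1 (((List.range (D + 1)).map f).length : Int) 1 := by
      rw [PySem.List.mem_pyRange_one]
      simp
      omega
    have h2 := h _ hmem
    rw [pvGetMapRange D f (k : Int) (by omega) (by omega)] at h2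
    rw [show ((k : Int) - 1) = ((k - 1 : Nat) : Int) from by omega] at h2
    rw [pvGetMapRange D f ((k - 1 : Nat) : Int) (by omega) (by omega)] at h2
    simp at h2
    exact h2
  · intro h x hx
    rw [PySem.List.mem_pyRange_one] at hx
    obtain ⟨hx1, hx2⟩ := hx
    simp only [List.length_map, List.length_range] at hx2
    rw [pvGetMapRange D f x (by omega) (by omega)]
    rw [show x - 1 = ((x.toNat - 1 : Nat) : Int) from by omega]
    rw [pvGetMapRange D f _ (by omega) (by omega)]
    simp
    have := h x.toNat (by omega) (by omega)
    omega

theorem pvAlt_iff (P : List (Int × Int)) (hP : P ≠ []) :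
    check_if_y_monotone_alt P = true ↔
      ∀ i : Int, 0 ≤ i → i < (P.length : Int) →
        (((i - (pvExtrema P).1) % (P.length : Int) <
            ((pvExtrema P).2 - (pvExtrema P).1) % (P.length : Int) →
            pvY P ((i + 1) % (P.length : Int)) ≤ pvY P i) ∧
         (((pvExtrema P).2 - (pvExtrema P).1) % (P.length : Int) ≤
            (i - (pvExtrema P).1) % (P.length : Int) →
            pvY P i ≤ pvY P ((i + 1) % (P.length : Int)))) := by
  have hn : 0 < (P.length : Int) := by
    have := List.length_pos_iff.mpr hP
    omega
  unfold check_if_y_monotone_alt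
  simp only [PySem.Int.mod_eq_emod_of_pos hn]
  rw [List.all_eq_true]
  constructor
  · intro h i h0 h1
    have h2 := h i (PySem.List.mem_pyRange_one.mpr ⟨h0, h1⟩)
    simp at h2
    refine ⟨?_, ?_⟩
    · intro hc
      rcases h2.1 with h | h
      · omega
      · exact h
    · intro hc
      rcases h2.2 with h | h
      · omega
      · exact h
  · intro h x hx
    rw [PySem.List.mem_pyRange_one] at hx
    have h2 := h x hx.1 hx.2
    simp
    rcases h2 with ⟨ha, hb⟩
    constructor
    · by_cases hc : (x - (pvExtrema P).1) % (P.length : Int) <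
        ((pvExtrema P).2 - (pvExtrema P).1) % (P.length : Int)
      · exact Or.inr (ha hc)
      · exact Or.inl (by omega)
    · by_cases hc : ((pvExtrema P).2 - (pvExtrema P).1) % (P.length : Int) ≤
        (x - (pvExtrema P).1) % (P.length : Int)
      · exact Or.inr (hb hc)
      · exact Or.inl (by omega)

theorem check_if_y_monotone_spec' (P : List (Int × Int)) (hP : P ≠ []) :
    check_if_y_monotone P = check_if_y_monotone_alt P := by
  have hlen : 0 < P.length := List.length_pos_iff.mpr hP
  have hn : 0 < (P.length : Int) := by omega
  obtain ⟨hBmax, hBmin⟩ := pvExtrema_spec P hP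
  obtain ⟨m1, hm1, hm1a, hm1b, hm1c, hm1d⟩ := pvMax?_pyRange P P.length (by omega)
  obtain ⟨m2, hm2, hm2a, hm2b, hm2c, hm2d⟩ := pvMin?_pyRange P P.length (by omega)
  have hM1 : pvIsFirstMax P m1 := ⟨hm1a, hm1b, hm1c, hm1d⟩
  have hM2 : pvIsFirstMin P m2 := ⟨hm2a, hm2b, hm2c, hm2d⟩
  unfold check_if_y_monotone
  rw [if_neg (by simp [hP])]
  simp only [hm1, hm2, Option.getD_some]
  have hfold := pvAfold P hP m1 m2 hM1 hM2
  have hstM := pvFirstMax_unique hfold.1 hBmax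
  have hstm := pvFirstMin_unique hfold.2 hBmin
  rw [hstM, hstm]
  have hiM0 := hBmax.1
  have hiMn := hBmax.2.1
  have him0 := hBmin.1
  have himn := hBmin.2.1
  rw [pvChain_fwd (P.length : Int) (pvExtrema P).2 him0 himn _ _ hiM0 hiMn
    (by
      have h1 : 0 ≤ ((pvExtrema P).2 - (pvExtrema P).1) % (P.length : Int) :=
        Int.emod_nonneg _ (by omega)
      have h2 : ((pvExtrema P).2 - (pvExtrema P).1) % (P.length : Int) < (P.length : Int) :=
        Int.emod_lt_of_pos _ hn
      omega)]
  rw [pvChain_bwd (P.length : Int) (pvExtrema P).2 him0 himn _ _ hiM0 hiMn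
    (by
      have h1 : 0 ≤ ((pvExtrema P).1 - (pvExtrema P).2) % (P.length : Int) :=
        Int.emod_nonneg _ (by omega)
      have h2 : ((pvExtrema P).1 - (pvExtrema P).2) % (P.length : Int) < (P.length : Int) :=
        Int.emod_lt_of_pos _ hn
      omega)]
  rw [show ∀ x y : Bool, (if !x then false else if !y then false else true) = (x && y) from by decide]
  rw [Bool.eq_iff_iff, Bool.and_eq_true]
  rw [pvDescends_iff, pvDescends_iff, pvAlt_iff P hP]
  have harc := pvArc P (pvExtrema P).1 (pvExtrema P).2 hBmax hBmin
  rw [← harc]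
  constructor
  · rintro ⟨hL, hR⟩
    constructor
    · intro k h1 h2
      have := hL k h1 (by
        have h3 : 0 ≤ ((pvExtrema P).2 - (pvExtrema P).1) % (P.length : Int) :=
          Int.emod_nonneg _ (by omega)
        omega)
      rwa [show ((pvExtrema P).1 + ((k - 1 : Nat) : Int)) % (P.length : Int) =
        ((pvExtrema P).1 + (k : Int) - 1) % (P.length : Int) from by congr 1; omega] at this
    · intro k h1 h2
      have := hR k h1 (by
        have h3 : 0 ≤ ((pvExtrema P).1 - (pvExtrema P).2) % (P.length : Int) :=
          Int.emod_nonneg _ (by omega)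
        omega)
      rwa [show ((pvExtrema P).1 - ((k - 1 : Nat) : Int)) % (P.length : Int) =
        ((pvExtrema P).1 - (k : Int) + 1) % (P.length : Int) from by congr 1; omega] at this
  · rintro ⟨hL, hR⟩
    constructor
    · intro k h1 h2
      have := hL k h1 (by omega)
      rwa [show ((pvExtrema P).1 + (k : Int) - 1) % (P.length : Int) =
        ((pvExtrema P).1 + ((k - 1 : Nat) : Int)) % (P.length : Int) from by congr 1; omega] at this
    · intro k h1 h2
      have := hR k h1 (by omega)
      rwa [show ((pvExtrema P).1 - (k : Int) + 1) % (P.length : Int) =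
        ((pvExtrema P).1 - ((k - 1 : Nat) : Int)) % (P.length : Int) from by congr 1; omega] at this

-- ===== VERDICT (by name: the statement is the Claim_ definition above) =====
theorem check_if_y_monotone_spec : Claim_equal_check_if_y_monotone := by
  intro P _ hpre
  unfold Spec_check_if_y_monotone
  exact check_if_y_monotone_spec' P hpre
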